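-- pv_equiv track=rewrite | github.com/yuanh23/iot-query-processing-project | optimized_query.py | build_partitioned_index
-- ===== SOURCE A (Python) =====
-- def build_partitioned_index(data):
--     data_by_sensor = {}
--
--     for reading in data:
--         sensor_id = reading["sensor_id"]
--
--         if sensor_id not in data_by_sensor:
--             data_by_sensor[sensor_id] = []
--
--         data_by_sensor[sensor_id].append(reading)
--
--     for sensor_id in data_by_sensor:
--         data_by_sensor[sensor_id].sort(key=lambda reading: reading["timestamp"])
--
--     return data_by_sensor
-- ===== SOURCE B (Python) =====
-- def build_partitioned_index(data):
--     # keys in first-appearance order (same as A), then one global stable sort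
--     # by timestamp and a single fill pass: no per-group sorting needed.
--     result = {reading["sensor_id"]: [] for reading in data}
--     for reading in sorted(data, key=lambda r: r["timestamp"]):
--         result[reading["sensor_id"]].append(reading)
--     return result
-- ===== Notes on version B (the rewrite author's own statement) =====
-- stated objective: alternative
-- what changed: A partitions first and then sorts each sensor's bucket separately; B does one global stable sort by timestamp and a single fill pass into pre-created buckets, with no per-group sorting.
import Mathlib
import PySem

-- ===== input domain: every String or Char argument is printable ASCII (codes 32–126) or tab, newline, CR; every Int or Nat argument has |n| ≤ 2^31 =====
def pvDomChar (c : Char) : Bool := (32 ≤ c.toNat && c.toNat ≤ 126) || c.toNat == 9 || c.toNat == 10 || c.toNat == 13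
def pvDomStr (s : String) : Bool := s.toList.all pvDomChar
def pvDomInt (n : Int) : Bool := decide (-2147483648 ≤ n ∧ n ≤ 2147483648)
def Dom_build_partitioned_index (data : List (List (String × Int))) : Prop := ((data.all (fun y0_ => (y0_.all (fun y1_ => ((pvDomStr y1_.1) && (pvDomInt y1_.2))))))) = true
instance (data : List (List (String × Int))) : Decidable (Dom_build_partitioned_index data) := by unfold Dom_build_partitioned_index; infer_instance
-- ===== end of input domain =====

-- A partitions readings by sensor and sorts each bucket; B does ONE global stable
-- sort by timestamp and a single fill pass (alternative decomposition, same cost).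

-- reading[k] for a reading dict; Pre_ guarantees the key is present, so the
-- default 0 is never reached on admitted inputs.
def pvKeyVal (r : List (String × Int)) (k : String) : Int :=
  ((PySem.Dict.ofList r).get? k).getD 0

-- ===== PORT A =====
def build_partitioned_index (data : List (List (String × Int))) : List (Int × List (List (String × Int))) :=
  -- first loop: group readings by sensor_id (create-empty-then-append == modify with default [])
  let d1 := data.foldl (fun d r => d.modify (pvKeyVal r "sensor_id") [] (· ++ [r])) PySem.Dict.empty
  -- second loop: for sensor_id in dict: in-place sort of that bucket by timestamp
  let d2 := d1.keys.foldl (fun d k => d.modify k [] (fun l => PySem.List.sorted l (fun r => pvKeyVal r "timestamp"))) d1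
  d2.items

-- ===== PORT B =====
def build_partitioned_index_alt (data : List (List (String × Int))) : List (Int × List (List (String × Int))) :=
  -- dict comprehension: empty bucket per sensor_id, keys in first-appearance order
  let result := data.foldl (fun d r => d.insert (pvKeyVal r "sensor_id") []) PySem.Dict.empty
  -- one global stable sort by timestamp, then a single append pass
  let filled := (PySem.List.sorted data (fun r => pvKeyVal r "timestamp")).foldl
      (fun d r => d.modify (pvKeyVal r "sensor_id") [] (· ++ [r])) result
  filled.items

-- ===== PRECONDITION & SPEC =====
-- A raises KeyError when a reading lacks the "sensor_id" key (first loop) or the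
-- "timestamp" key (sort key of the second loop); Pre_ excludes exactly those inputs.
def Pre_build_partitioned_index (data : List (List (String × Int))) : Prop :=
  ∀ r ∈ data, "sensor_id" ∈ r.map (·.1) ∧ "timestamp" ∈ r.map (·.1)
instance (data : List (List (String × Int))) : Decidable (Pre_build_partitioned_index data) := by unfold Pre_build_partitioned_index; infer_instance

def pvWitness_build_partitioned_index : (List (List (String × Int))) :=
  [[("sensor_id", 1), ("timestamp", 9)], [("sensor_id", 2), ("timestamp", 3)], [("sensor_id", 1), ("timestamp", 3)]]

def Spec_build_partitioned_index (data : List (List (String × Int))) (out : List (Int × List (List (String × Int)))) : Prop := out = build_partitioned_index_alt data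
instance (data : List (List (String × Int))) (out : List (Int × List (List (String × Int)))) : Decidable (Spec_build_partitioned_index data out) := by unfold Spec_build_partitioned_index; infer_instance

-- ===== CLAIM (what is proved, stated in full; the proofs are below) =====
def Claim_equal_build_partitioned_index : Prop := ∀ (data : List (List (String × Int))), Dom_build_partitioned_index data → Pre_build_partitioned_index data → Spec_build_partitioned_index data (build_partitioned_index data)

-- ===== LEMMAS AND PROOFS =====

-- x filtered out: insertBy-then-filter drops x
lemma filter_insertBy_neg {α : Type} (b : α → α → Bool) (p : α → Bool) (x : α) (ys : List α)
    (hx : p x = false) :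
    (PySem.List.insertBy b x ys).filter p = ys.filter p := by
  induction ys with
  | nil => simp [PySem.List.insertBy, hx]
  | cons y ys ih =>
    by_cases h : b x y = true
    · simp [PySem.List.insertBy, h, hx]
    · simp only [PySem.List.insertBy, h] at *
      simp [List.filter_cons, ih]

-- x kept: filter commutes with stable insertion into a key-sorted list
lemma filter_insertBy_pos {α : Type} (key : α → Int) (p : α → Bool) (x : α) (ys : List α)
    (hx : p x = true) (hs : ys.Pairwise (fun a b => key a ≤ key b)) :
    (PySem.List.insertBy (fun a b => decide (key a < key b)) x ys).filter p
      = PySem.List.insertBy (fun a b => decide (key a < key b)) x (ys.filter p) := by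
  induction ys with
  | nil => simp [PySem.List.insertBy, hx]
  | cons y ys ih =>
    rcases List.pairwise_cons.mp hs with ⟨hy, hs'⟩
    by_cases h : key x < key y
    · -- x goes in front; every surviving element of y :: ys also has key > key x
      simp only [PySem.List.insertBy, decide_eq_true_eq, if_pos h]
      rw [List.filter_cons_of_pos hx]
      cases hf : (y :: ys).filter p with
      | nil => simp [PySem.List.insertBy]
      | cons z rest =>
        have hz : z ∈ y :: ys := List.mem_of_mem_filter (hf ▸ List.mem_cons_self)
        have hkz : key x < key z := by
          rcases List.mem_cons.mp hz with rfl | hz'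
          · exact h
          · exact lt_of_lt_of_le h (hy z hz')
        simp [PySem.List.insertBy, hkz]
    · simp only [PySem.List.insertBy, decide_eq_true_eq, if_neg h]
      by_cases hp : p y = true
      · rw [List.filter_cons_of_pos hp, List.filter_cons_of_pos hp]
        simp [PySem.List.insertBy, h, ih hs']
      · rw [List.filter_cons_of_neg (by simpa using hp), List.filter_cons_of_neg (by simpa using hp)]
        exact ih hs'

-- filter commutes with the stable sort
lemma sorted_append_singleton {α : Type} (key : α → Int) (l : List α) (x : α) :
    PySem.List.sorted (l ++ [x]) key
      = PySem.List.insertBy (fun a b => decide (key a < key b)) x (PySem.List.sorted l key) := by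
  rw [PySem.List.sorted_eq_foldl_insertBy, PySem.List.sorted_eq_foldl_insertBy, List.foldl_append]
  rfl

lemma filter_sorted {α : Type} (key : α → Int) (p : α → Bool) (l : List α) :
    (PySem.List.sorted l key).filter p = PySem.List.sorted (l.filter p) key := by
  induction l using List.reverseRecOn with
  | nil => simp [PySem.List.sorted]
  | append_singleton l x ih =>
    rw [sorted_append_singleton, List.filter_append]
    by_cases hp : p x = true
    · rw [List.filter_cons_of_pos hp, List.filter_nil, sorted_append_singleton,
          filter_insertBy_pos key p x _ hp (PySem.List.sorted_pairwise l key), ih]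
    · rw [List.filter_cons_of_neg (by simpa using hp), List.filter_nil, List.append_nil,
          filter_insertBy_neg _ p x _ (by simpa using hp), ih]

-- the grouping loop: bucket k collects the readings whose sensor_id is k, in order
lemma getD_group_foldl (sid : List (String × Int) → Int) (l : List (List (String × Int)))
    (d : PySem.Dict Int (List (List (String × Int)))) (k : Int) :
    (l.foldl (fun d r => d.modify (sid r) [] (· ++ [r])) d).getD k []
      = d.getD k [] ++ l.filter (fun r => sid r == k) := by
  induction l generalizing d with
  | nil => simp
  | cons r l ih =>
    rw [List.foldl_cons, ih, PySem.Dict.getD_modify, List.filter_cons]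
    by_cases h : k = sid r
    · simp [h, List.append_assoc]
    · simp [h, Ne.symm h]

-- the dict comprehension gives every key the empty bucket
lemma getD_empty_buckets (sid : List (String × Int) → Int) (l : List (List (String × Int)))
    (d : PySem.Dict Int (List (List (String × Int)))) (k : Int)
    (hd : d.getD k [] = []) :
    (l.foldl (fun d r => d.insert (sid r) []) d).getD k [] = [] := by
  induction l generalizing d with
  | nil => simpa
  | cons r l ih =>
    rw [List.foldl_cons]
    exact ih _ (by rw [PySem.Dict.getD_insert]; split <;> simp [hd])

-- the per-key sorting loop, over a duplicate-free key list
lemma getD_sort_foldl (f : List (List (String × Int)) → List (List (String × Int)))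
    (ks : List Int) (d : PySem.Dict Int (List (List (String × Int)))) (k : Int) :
    ks.Nodup →
    (ks.foldl (fun d k' => d.modify k' [] f) d).getD k []
      = if k ∈ ks then f (d.getD k []) else d.getD k [] := by
  induction ks generalizing d with
  | nil => simp
  | cons a ks ih =>
    intro hnd
    rcases List.nodup_cons.mp hnd with ⟨ha, hnd'⟩
    rw [List.foldl_cons, ih _ hnd']
    by_cases h : k = a
    · subst h
      simp [ha, PySem.Dict.getD_modify_self]
    · simp only [PySem.Dict.getD_modify_of_ne d [] f h, List.mem_cons, h, false_or]

-- Set.update by already-present elements is the identity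
lemma set_update_of_subset (s : PySem.Set Int) (xs : List Int) (h : ∀ x ∈ xs, x ∈ s) :
    PySem.Set.update s xs = s := by
  rw [PySem.Set.update_eq_append_filter]
  have hfil : (PySem.Set.ofList xs).filter (fun y => !s.contains y) = [] := by
    rw [List.filter_eq_nil_iff]
    intro y hy
    simp only [Bool.not_eq_eq_eq_not, Bool.not_true, ← Bool.not_eq_true, PySem.Set.contains_iff]
    exact fun hc => hc (h y ((PySem.Set.mem_ofList xs y).mp hy))
  rw [hfil, List.append_nil]

-- ===== VERDICT (by name: the statement is the Claim_ definition above) =====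
theorem build_partitioned_index_spec : Claim_equal_build_partitioned_index := by
  intro data _hdom _hpre
  unfold Spec_build_partitioned_index build_partitioned_index build_partitioned_index_alt
  set sid := fun r => pvKeyVal r "sensor_id" with hsid
  set ts := fun r => pvKeyVal r "timestamp" with hts
  -- keys of the two final dicts
  have hk1 : (data.foldl (fun d r => d.modify (sid r) [] (· ++ [r])) (PySem.Dict.empty : PySem.Dict Int (List (List (String × Int))))).keys
      = PySem.Set.ofList (data.map sid) := by
    rw [PySem.Dict.keys_foldl_modify_key data sid [] (fun _ r => (· ++ [r]))]
    simp [PySem.Dict.keys_empty, PySem.Set.update_nil_left]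
  have hkB : (data.foldl (fun d r => d.insert (sid r) []) (PySem.Dict.empty : PySem.Dict Int (List (List (String × Int))))).keys
      = PySem.Set.ofList (data.map sid) := by
    rw [PySem.Dict.keys_foldl_insert_key data sid (fun _ _ => [])]
    simp [PySem.Dict.keys_empty, PySem.Set.update_nil_left]
  have hnd : (PySem.Set.ofList (data.map sid)).Nodup := PySem.Set.nodup_ofList _
  -- final keys unchanged by the second passes
  have hk2 : ((data.foldl (fun d r => d.modify (sid r) [] (· ++ [r])) PySem.Dict.empty).keys.foldl
      (fun d k => d.modify k [] (fun l => PySem.List.sorted l ts))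
      (data.foldl (fun d r => d.modify (sid r) [] (· ++ [r])) (PySem.Dict.empty : PySem.Dict Int (List (List (String × Int)))))).keys
      = PySem.Set.ofList (data.map sid) := by
    rw [PySem.Dict.keys_foldl_modify _ [] (fun _ _ => fun l => PySem.List.sorted l ts), hk1]
    exact set_update_of_subset _ _ (fun x hx => hx)
  have hkF : ((PySem.List.sorted data ts).foldl
      (fun d r => d.modify (sid r) [] (· ++ [r]))
      (data.foldl (fun d r => d.insert (sid r) []) (PySem.Dict.empty : PySem.Dict Int (List (List (String × Int)))))).keys
      = PySem.Set.ofList (data.map sid) := by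
    rw [PySem.Dict.keys_foldl_modify_key _ sid [] (fun _ r => (· ++ [r])), hkB]
    apply set_update_of_subset
    intro x hx
    rcases List.mem_map.mp hx with ⟨r, hr, rfl⟩
    exact (PySem.Set.mem_ofList _ _).mpr (List.mem_map_of_mem ((PySem.List.mem_sorted _ _ _ _).mp hr))
  -- items via keys + getD
  rw [PySem.Dict.items_eq_map_keys _ (hk2 ▸ hnd) [], PySem.Dict.items_eq_map_keys _ (hkF ▸ hnd) [],
      hk2, hkF]
  apply List.map_congr_left
  intro k _hk
  -- the buckets agree at every key
  have hA : ((data.foldl (fun d r => d.modify (sid r) [] (· ++ [r])) PySem.Dict.empty).keys.foldl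
      (fun d k => d.modify k [] (fun l => PySem.List.sorted l ts))
      (data.foldl (fun d r => d.modify (sid r) [] (· ++ [r])) (PySem.Dict.empty : PySem.Dict Int (List (List (String × Int)))))).getD k []
      = PySem.List.sorted (data.filter (fun r => sid r == k)) ts := by
    rw [getD_sort_foldl _ _ _ _ (hk1 ▸ hnd), getD_group_foldl]
    simp only [PySem.Dict.getD_empty, List.nil_append]
    split
    · rfl
    · next hmem =>
      rw [hk1] at hmem
      have : data.filter (fun r => sid r == k) = [] := by
        rw [List.filter_eq_nil_iff]
        intro r hr hkr
        exact hmem ((PySem.Set.mem_ofList _ _).mpr (List.mem_map.mpr ⟨r, hr, by simpa using hkr⟩))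
      simp [this, PySem.List.sorted]
  have hB : ((PySem.List.sorted data ts).foldl
      (fun d r => d.modify (sid r) [] (· ++ [r]))
      (data.foldl (fun d r => d.insert (sid r) []) (PySem.Dict.empty : PySem.Dict Int (List (List (String × Int)))))).getD k []
      = PySem.List.sorted (data.filter (fun r => sid r == k)) ts := by
    rw [getD_group_foldl, getD_empty_buckets sid data _ k (by simp), List.nil_append,
        ← filter_sorted ts (fun r => sid r == k) data]
  rw [hA, hB]
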